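-- pv_equiv track=rewrite | github.com/mgh3326/programmers_algorithm | 코딩테스트_연습/완전탐색/숫자야구/main.py | solution
-- ===== SOURCE A (Python) =====
-- def solution(baseball):
--     all_list = []
--     for i in range(1, 10):
--         for j in range(1, 10):
--             if i == j:
--                 continue
--             for k in range(1, 10):
--                 if i == k or j == k:
--                     continue
--                 all_list.append([str(i), str(j), str(k)])
--
--     answer = 0
--     for number, strike, ball in baseball:
--         remove_list = []
--         for all_value in all_list:
--             temp_strike = 0
--             temp_ball = 0
--             for number_value in str(number):
--                 if number_value in all_value:
--                     if str(number).index(number_value) == all_value.index(number_value):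
--                         temp_strike += 1
--                     else:
--                         temp_ball += 1
--             if temp_strike == strike and temp_ball == ball:
--                 pass
--             else:
--                 remove_list.append(all_value)
--         for remove in remove_list:
--             all_list.remove(remove)
--
--     return len(all_list)
-- ===== SOURCE B (Python) =====
-- def solution(baseball):
--     def judge(cand, number, strike, ball):
--         s = str(number)
--         hits = [ch for ch in s if ch in cand]
--         st = sum(1 for ch in hits if s.index(ch) == cand.index(ch))
--         return st == strike and len(hits) - st == ball
--
--     digits = "123456789"
--     cands = [[x, y, z] for x in digits for y in digits for z in digits
--              if x != y and x != z and y != z]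
--     return sum(1 for cand in cands
--                if all(judge(cand, n, s, b) for n, s, b in baseball))
-- ===== Notes on version B (the rewrite author's own statement) =====
-- stated objective: simpler
-- what changed: Instead of A's mutation loop that builds a remove-list per clue and deletes each failure from the shared candidate list with list.remove, B builds the fixed 504-candidate universe by one comprehension and counts in a single pass the candidates whose hit/strike split satisfies every clue.
import Mathlib
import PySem

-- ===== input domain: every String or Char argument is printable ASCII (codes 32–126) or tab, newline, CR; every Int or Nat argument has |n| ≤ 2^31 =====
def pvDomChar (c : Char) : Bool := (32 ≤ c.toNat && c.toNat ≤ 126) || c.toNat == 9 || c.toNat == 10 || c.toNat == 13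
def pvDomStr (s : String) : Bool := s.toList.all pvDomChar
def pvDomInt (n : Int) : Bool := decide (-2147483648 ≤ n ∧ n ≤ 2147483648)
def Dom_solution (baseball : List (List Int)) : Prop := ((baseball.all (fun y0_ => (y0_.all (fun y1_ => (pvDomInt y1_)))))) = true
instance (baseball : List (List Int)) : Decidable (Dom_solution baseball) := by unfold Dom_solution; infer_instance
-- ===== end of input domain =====

-- B replaces A's per-clue remove-list mutation of the candidate universe by a single
-- counting pass over the fixed universe, testing each candidate against all clues (objective: simpler).

-- ===== PORT A =====

-- A's triple nested range(1,10) loops with 'continue', appending [str(i),str(j),str(k)]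
def pvAllA : List (List Char) :=
  (PySem.List.pyRange 1 10 1).foldl (fun acc i =>
    (PySem.List.pyRange 1 10 1).foldl (fun acc j =>
      if i = j then acc else
      (PySem.List.pyRange 1 10 1).foldl (fun acc k =>
        if i = k ∨ j = k then acc else
        acc ++ [PySem.Int.toChars i ++ PySem.Int.toChars j ++ PySem.Int.toChars k]) acc) acc) []

-- A's per-candidate test (the inner 'for number_value in str(number)' loop and the
-- strike/ball comparison); .index is exact via index? (the char is a member on both calls)
def pvJudgeA (number strike ball : Int) (cand : List Char) : Bool :=
  let s := PySem.Int.toChars number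
  let p := s.foldl (fun (acc : Int × Int) ch =>
      if ch ∈ cand then
        if (PySem.List.index? s ch).getD 0 = (PySem.List.index? cand ch).getD 0
        then (acc.1 + 1, acc.2) else (acc.1, acc.2 + 1)
      else acc) ((0 : Int), (0 : Int))
  decide (p.1 = strike ∧ p.2 = ball)

def solution (baseball : List (List Int)) : Int :=
  let final := baseball.foldl (fun allList clue =>
    match clue with
    | [number, strike, ball] =>
      let removeList := allList.foldl (fun rl cand =>
        if pvJudgeA number strike ball cand then rl else rl ++ [cand]) []
      removeList.foldl (fun l r => (PySem.List.remove? l r).getD l) allList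
    | _ => allList) pvAllA   -- a clue of length ≠ 3 raises in Python (excluded by Pre_)
  (final.length : Int)

-- ===== PORT B =====

def pvDigits : List Char := "123456789".toList

-- B's comprehension over the digit string
def pvCands : List (List Char) :=
  pvDigits.flatMap (fun x => pvDigits.flatMap (fun y => pvDigits.flatMap (fun z =>
    if x ≠ y ∧ x ≠ z ∧ y ≠ z then [[x, y, z]] else [])))

-- B's judge: collect the hit digits, count the strikes among them
def pvJudgeB (cand : List Char) (number strike ball : Int) : Bool :=
  let s := PySem.Int.toChars number
  let hits := s.filter (fun ch => decide (ch ∈ cand))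
  let st := hits.countP (fun ch =>
    decide ((PySem.List.index? s ch).getD 0 = (PySem.List.index? cand ch).getD 0))
  decide ((st : Int) = strike ∧ (hits.length : Int) - (st : Int) = ball)

-- B's per-clue wrapper: unpack the clue by position (Python's 'for n, s, b in baseball';
-- a clue of length ≠ 3 raises in Python and is excluded by Pre_, the defaults are never used there)
def pvClueB (cand : List Char) (clue : List Int) : Bool :=
  pvJudgeB cand (clue.getD 0 0) (clue.getD 1 0) (clue.getD 2 0)

def solution_alt (baseball : List (List Int)) : Int :=
  ((pvCands.countP (fun cand => baseball.all (pvClueB cand))) : Int)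

-- ===== PRECONDITION & SPEC =====
-- Pre_ excludes exactly the clues Python cannot unpack: 'for number, strike, ball in baseball'
-- raises ValueError unless every clue has length 3.
def Pre_solution (baseball : List (List Int)) : Prop :=
  ∀ clue ∈ baseball, clue.length = 3
instance (baseball : List (List Int)) : Decidable (Pre_solution baseball) := by
  unfold Pre_solution; infer_instance

def pvWitness_solution : List (List Int) := [[123, 1, 1], [356, 1, 0]]

def Spec_solution (baseball : List (List Int)) (out : Int) : Prop := out = solution_alt baseball
instance (baseball : List (List Int)) (out : Int) : Decidable (Spec_solution baseball out) := by unfold Spec_solution; infer_instance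

-- ===== CLAIM (what is proved, stated in full; the proofs are below) =====
def Claim_equal_solution : Prop := ∀ (baseball : List (List Int)), Dom_solution baseball → Pre_solution baseball → Spec_solution baseball (solution baseball)

-- ===== LEMMAS AND PROOFS =====

-- the two candidate universes coincide
set_option maxRecDepth 40000 in
theorem pvAll_eq : pvAllA = pvCands := by decide

-- A's inner strike/ball fold, with general accumulator, counts hits split by index match
theorem pvFold_count (s cand : List Char) (l : List Char) (a b : Int) :
    l.foldl (fun (acc : Int × Int) ch =>
      if ch ∈ cand then
        if (PySem.List.index? s ch).getD 0 = (PySem.List.index? cand ch).getD 0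
        then (acc.1 + 1, acc.2) else (acc.1, acc.2 + 1)
      else acc) (a, b)
    = (a + ((l.filter (fun ch => decide (ch ∈ cand))).countP (fun ch =>
            decide ((PySem.List.index? s ch).getD 0 = (PySem.List.index? cand ch).getD 0)) : Int),
       b + ((l.filter (fun ch => decide (ch ∈ cand))).countP (fun ch =>
            !decide ((PySem.List.index? s ch).getD 0 = (PySem.List.index? cand ch).getD 0)) : Int)) := by
  induction l generalizing a b with
  | nil => simp
  | cons ch t ih =>
    rw [List.foldl_cons]
    by_cases hm : ch ∈ cand
    · by_cases hi : (PySem.List.index? s ch).getD 0 = (PySem.List.index? cand ch).getD 0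
      · rw [if_pos hm, if_pos hi, ih]
        simp only [List.filter_cons, hm, decide_true, if_true, List.countP_cons, hi, Bool.not_true, Prod.mk.injEq]
        constructor <;> push_cast <;> ring
      · rw [if_pos hm, if_neg hi, ih]
        simp only [List.filter_cons, hm, decide_true, if_true, List.countP_cons, hi, decide_false,
          Bool.not_false, Prod.mk.injEq]
        constructor <;> push_cast <;> ring
    · rw [if_neg hm, ih]
      simp [hm]

-- counting a predicate and its negation covers the list
theorem pvCount_split {α : Type} (p : α → Bool) (l : List α) :
    l.countP p + l.countP (fun x => !p x) = l.length := by
  induction l with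
  | nil => simp
  | cons x t ih => by_cases h : p x <;> simp [h] <;> omega

-- the two per-candidate judges agree
theorem pvJudge_eq (n st b : Int) (cand : List Char) :
    pvJudgeA n st b cand = pvJudgeB cand n st b := by
  simp only [pvJudgeA, pvJudgeB]
  rw [pvFold_count]
  have hsum := pvCount_split
    (fun ch => decide ((PySem.List.index? (PySem.Int.toChars n) ch).getD 0
      = (PySem.List.index? cand ch).getD 0))
    ((PySem.Int.toChars n).filter (fun ch => decide (ch ∈ cand)))
  rw [decide_eq_decide]
  simp only [zero_add] at hsum ⊢
  omega

-- removing (via Python list.remove) every collected failure restores a plain filter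
theorem pvRemove_filter (p : List Char → Bool) (l : List (List Char)) :
    (l.filter (fun x => !p x)).foldl
      (fun acc r => (PySem.List.remove? acc r).getD acc) l = l.filter p := by
  have step_ne : ∀ (x : List Char) (t : List (List Char)) (rs : List (List Char)),
      (∀ r ∈ rs, r ≠ x) →
      rs.foldl (fun acc r => (PySem.List.remove? acc r).getD acc) (x :: t)
        = x :: rs.foldl (fun acc r => (PySem.List.remove? acc r).getD acc) t := by
    intro x t rs
    induction rs generalizing t with
    | nil => intro _; simp
    | cons r rs ih =>
      intro h
      have hne : x ≠ r := fun e => (h r (by simp)) e.symm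
      have : (PySem.List.remove? (x :: t) r).getD (x :: t)
          = x :: (PySem.List.remove? t r).getD t := by
        rw [PySem.List.remove?_cons_of_ne t hne]
        cases hrt : PySem.List.remove? t r with
        | none => simp
        | some u => simp
      simp only [List.foldl_cons, this]
      exact ih _ (fun r' hr' => h r' (by simp [hr']))
  induction l with
  | nil => simp
  | cons x t ih =>
    by_cases hx : p x
    · have hfil : (x :: t).filter (fun y => !p y) = t.filter (fun y => !p y) := by
        simp [hx]
      rw [hfil, step_ne x t _ (fun r hr => by
        have := List.of_mem_filter hr
        intro e; rw [e] at this; simp [hx] at this), ih]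
      simp [hx]
    · have hfil : (x :: t).filter (fun y => !p y) = x :: t.filter (fun y => !p y) := by
        simp [hx]
      rw [hfil]
      simp only [List.foldl_cons, PySem.List.remove?_cons_self, Option.getD_some]
      rw [ih]
      simp [hx]

-- A's remove-list construction is a filter of the failures
theorem pvRemoveList_eq (n st b : Int) (l : List (List Char)) :
    l.foldl (fun rl cand => if pvJudgeA n st b cand then rl else rl ++ [cand]) []
      = l.filter (fun cand => !pvJudgeA n st b cand) := by
  have h : ∀ acc, l.foldl (fun rl cand => if pvJudgeA n st b cand then rl else rl ++ [cand]) acc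
      = acc ++ l.filter (fun cand => !pvJudgeA n st b cand) := by
    induction l with
    | nil => simp
    | cons c t ih =>
      intro acc
      by_cases hc : pvJudgeA n st b c
      · simp [hc, ih]
      · simp [hc, ih]
  simpa using h []

-- B's all-clues predicate
def pvAllClues (baseball : List (List Int)) (cand : List Char) : Bool :=
  baseball.all (fun clue => pvClueB cand clue)

-- the folded per-clue filtering of A equals one counting pass of B
theorem pvMain (bs : List (List Int)) (h : ∀ clue ∈ bs, clue.length = 3) :
    ∀ l : List (List Char),
      (bs.foldl (fun allList clue =>
        match clue with
        | [number, strike, ball] =>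
          let removeList := allList.foldl (fun rl cand =>
            if pvJudgeA number strike ball cand then rl else rl ++ [cand]) []
          removeList.foldl (fun l r => (PySem.List.remove? l r).getD l) allList
        | _ => allList) l).length
      = l.countP (pvAllClues bs) := by
  induction bs with
  | nil =>
    intro l
    have : List.countP (pvAllClues []) l = l.length :=
      List.countP_eq_length.mpr (fun c _ => by simp [pvAllClues])
    simp [this]
  | cons clue rest ih =>
    intro l
    obtain ⟨n, st, b, rfl⟩ := List.length_eq_three.mp (h clue (by simp))
    have hrest : ∀ c ∈ rest, c.length = 3 := fun c hc => h c (by simp [hc])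
    simp only [List.foldl_cons]
    rw [pvRemoveList_eq, pvRemove_filter, ih hrest]
    rw [List.countP_filter]
    apply List.countP_congr
    intro cand _
    simp [pvAllClues, pvClueB, pvJudge_eq, Bool.and_comm]

-- ===== VERDICT (by name: the statement is the Claim_ definition above) =====
theorem solution_spec : Claim_equal_solution := by
  intro baseball _ hpre
  unfold Spec_solution
  simp only [solution, solution_alt]
  rw [pvAll_eq, pvMain baseball hpre pvCands]
  rfl
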